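-- pv_equiv track=rewrite | github.com/Ananta-dot/misr_new | pb+rl.py | motif_ladder
-- ===== SOURCE A (Python) =====
-- from typing import Dict, List, Tuple, Optional
--
-- Seq = List[int]; Instance = Tuple[Seq,Seq]
--
-- def motif_ladder(n:int)->Seq:
--     out=[]; a,b=1,2
--     while len(out)<2*n:
--         out+=[a, b if b<=n else a]; a+=1; b+=1
--         if a>n:a=n;
--         if b>n:b=n
--     cnt={i:0 for i in range(1,n+1)}; fixed=[]
--     for x in out:
--         if cnt[x]<2: fixed.append(x); cnt[x]+=1
--     for i in range(1,n+1):
--         while cnt[i]<2: fixed.append(i); cnt[i]+=1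
--     return fixed[:2*n]
-- ===== SOURCE B (Python) =====
-- def motif_ladder(n: int) -> list:
--     if n < 1:
--         return []
--     out = [1]
--     for k in range(2, n + 1):
--         out += [k, k]
--     out.append(1)
--     return out
-- ===== Notes on version B (the rewrite author's own statement) =====
-- stated objective: simpler
-- what changed: B builds the ladder [1,2,2,...,n,n,1] directly in one pass, replacing A's three-pass pipeline (clamped a/b generator loop, counter-dict dedup pass, counter-driven fill pass, final slice).
import Mathlib
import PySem

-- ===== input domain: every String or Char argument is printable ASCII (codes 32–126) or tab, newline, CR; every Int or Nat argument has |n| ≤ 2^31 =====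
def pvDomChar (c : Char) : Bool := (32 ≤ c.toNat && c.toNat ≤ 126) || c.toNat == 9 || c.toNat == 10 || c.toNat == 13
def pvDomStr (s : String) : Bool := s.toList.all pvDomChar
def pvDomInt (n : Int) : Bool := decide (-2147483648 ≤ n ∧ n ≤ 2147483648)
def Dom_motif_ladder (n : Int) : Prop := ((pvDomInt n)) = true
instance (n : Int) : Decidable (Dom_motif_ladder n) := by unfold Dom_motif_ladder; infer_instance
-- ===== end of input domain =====

-- B builds the ladder [1,2,2,...,n,n,1] directly in one pass, replacing A's
-- generate / dict-dedup / dict-fill / slice pipeline (objective: simpler).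

-- ===== PORT A =====
-- the 'while len(out) < 2*n' generator loop with the clamped a, b counters
def motifLoop (n : Int) (out : List Int) (a b : Int) : List Int :=
  if (out.length : Int) < 2 * n then
    motifLoop n (out ++ [a, if b ≤ n then b else a])
      (if a + 1 > n then n else a + 1) (if b + 1 > n then n else b + 1)
  else out
termination_by (2 * n - out.length).toNat
decreasing_by simp only [List.length_append, List.length_cons, List.length_nil]; omega

-- one step of 'for x in out: if cnt[x] < 2: fixed.append(x); cnt[x] += 1'
-- (cnt[x]: the key is always present when A runs this, so the lookup is getD 0)
def dedupStep (s : List Int × PySem.Dict Int Int) (x : Int) : List Int × PySem.Dict Int Int :=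
  let c := (s.2.get? x).getD 0
  if c < 2 then (s.1 ++ [x], s.2.insert x (c + 1)) else s

-- 'while cnt[i] < 2: fixed.append(i); cnt[i] += 1'
def fillWhile (cnt : PySem.Dict Int Int) (i : Int) (fixed : List Int) :
    List Int × PySem.Dict Int Int :=
  let c := (cnt.get? i).getD 0
  if _h : c < 2 then fillWhile (cnt.insert i (c + 1)) i (fixed ++ [i]) else (fixed, cnt)
termination_by (2 - (cnt.get? i).getD 0).toNat
decreasing_by simp only [PySem.Dict.get?_insert_self, Option.getD_some]; omega

def motif_ladder (n : Int) : List Int :=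
  let out := motifLoop n [] 1 2
  let cnt0 : PySem.Dict Int Int :=
    (PySem.List.pyRange 1 (n + 1) 1).foldl (fun d i => d.insert i 0) PySem.Dict.empty
  let p := out.foldl dedupStep ([], cnt0)
  let q := (PySem.List.pyRange 1 (n + 1) 1).foldl (fun s i => fillWhile s.2 i s.1) p
  PySem.List.slice q.1 none (some (2 * n))

-- ===== PORT B =====
def motif_ladder_alt (n : Int) : List Int :=
  if n < 1 then []
  else ((PySem.List.pyRange 2 (n + 1) 1).foldl (fun out k => out ++ [k, k]) [1]) ++ [1]

-- ===== PRECONDITION & SPEC =====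
def Spec_motif_ladder (n : Int) (out : List Int) : Prop := out = motif_ladder_alt n
instance (n : Int) (out : List Int) : Decidable (Spec_motif_ladder n out) := by unfold Spec_motif_ladder; infer_instance

-- ===== CLAIM (what is proved, stated in full; the proofs are below) =====
def Claim_equal_motif_ladder : Prop := ∀ (n : Int), Dom_motif_ladder n → Spec_motif_ladder n (motif_ladder n)

-- ===== LEMMAS AND PROOFS =====

-- the suffix of 'out' produced by the last k iterations of the while loop
def segA : Nat → Int → List Int
  | 0, _ => []
  | k + 1, n => (n - k) :: (if n - k + 1 ≤ n then n - k + 1 else n - k) :: segA k n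

-- what the dedup pass keeps of segA k n (the duplicated final element dropped)
def segB : Nat → Int → List Int
  | 0, _ => []
  | 1, n => [n]
  | k + 2, n => (n - k - 1) :: (n - k) :: segB (k + 1) n

lemma motifLoop_stop (n : Int) (out : List Int) (a b : Int)
    (h : ¬ (out.length : Int) < 2 * n) : motifLoop n out a b = out := by
  rw [motifLoop]; simp [h]

lemma motifLoop_spec (k : Nat) : ∀ (n : Int) (out : List Int) (a b : Int),
    1 ≤ n → (k : Int) ≤ n → (out.length : Int) = 2 * (n - k) →
    (1 ≤ k → a = n - k + 1 ∧ (b = n - k + 2 ∨ (b = n ∧ n < n - (k : Int) + 2))) →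
    motifLoop n out a b = out ++ segA k n := by
  induction k with
  | zero =>
    intro n out a b _ _ hlen _
    rw [motifLoop_stop n out a b (by push_cast at hlen ⊢; omega)]
    simp [segA]
  | succ k ih =>
    intro n out a b hn hk hlen hab
    obtain ⟨ha, hb⟩ := hab (by omega)
    push_cast at hk hlen ha hb
    rw [motifLoop]
    rw [if_pos (by push_cast; omega)]
    have hstep : motifLoop n (out ++ [a, if b ≤ n then b else a])
        (if a + 1 > n then n else a + 1) (if b + 1 > n then n else b + 1)
        = (out ++ [a, if b ≤ n then b else a]) ++ segA k n := by
      apply ih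
      · exact hn
      · omega
      · simp only [List.length_append, List.length_cons, List.length_nil]; push_cast; omega
      · intro hk1
        constructor
        · split_ifs with h1 <;> push_cast <;> omega
        · rcases hb with hb | hb
          · split_ifs with h1
            · right; push_cast; omega
            · left; push_cast; omega
          · split_ifs with h1 <;> [skip; skip] <;> push_cast <;> omega
    have hxa : a = n - (k : Int) := by omega
    have hxb : (if b ≤ n then b else a) = (if n - (k : Int) + 1 ≤ n then n - (k : Int) + 1 else n - (k : Int)) := by
      rcases hb with hb | hb <;> split_ifs <;> omega
    rw [hstep, hxb, hxa]
    simp only [segA, List.append_assoc, List.cons_append, List.nil_append]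

lemma zero_dict_getD (l : List Int) : ∀ (d : PySem.Dict Int Int),
    (∀ j, (d.get? j).getD 0 = 0) →
    ∀ j, (((l.foldl (fun d i => d.insert i 0) d).get? j).getD 0) = 0 := by
  induction l with
  | nil => intro d h j; simpa using h j
  | cons x t ih =>
    intro d h j
    simp only [List.foldl_cons]
    apply ih
    intro j'
    rw [PySem.Dict.get?_insert]
    split
    · simp
    · exact h j'

lemma dedup_spec (k : Nat) : ∀ (n : Int) (fixed : List Int) (cnt : PySem.Dict Int Int),
    1 ≤ k → (k : Int) ≤ n →
    ((cnt.get? (n - k + 1)).getD 0 = 1) →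
    (∀ j, n - k + 1 < j → (cnt.get? j).getD 0 = 0) →
    ((segA k n).foldl dedupStep (fixed, cnt)).1 = fixed ++ segB k n ∧
    (∀ j, ((((segA k n).foldl dedupStep (fixed, cnt)).2.get? j).getD 0) =
      if n - k + 1 ≤ j ∧ j ≤ n then 2 else (cnt.get? j).getD 0) := by
  induction k with
  | zero => intro n fixed cnt h1; omega
  | succ k ih =>
    intro n fixed cnt _ hk hc1 hc0
    match k, ih with
    | 0, _ =>
      -- last iteration: segA 1 n = [n, n]
      have hseg : segA 1 n = [n, n] := by
        simp only [segA]; norm_num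
      push_cast at hc1 hk hc0
      rw [hseg]
      simp only [List.foldl_cons, List.foldl_nil, dedupStep]
      rw [show n - (1:Int) + 1 = n by ring] at hc1
      simp only [hc1]
      norm_num
      constructor
      · simp [segB]
      · intro j
        rw [PySem.Dict.get?_insert]
        split_ifs with h1 h2 h2
        · simp
        · omega
        · omega
        · rfl
    | k + 1, ih =>
      push_cast at hc1 hk hc0
      have hseg : segA (k + 2) n
          = (n - (k:Int) - 1) :: (n - (k:Int)) :: segA (k + 1) n := by
        simp only [segA]
        push_cast
        rw [if_pos (by omega)]
        ring_nf
      rw [hseg]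
      simp only [List.foldl_cons, dedupStep]
      rw [show n - ((k:Int) + 1 + 1) + 1 = n - (k:Int) - 1 by ring] at hc1
      simp only [hc1]
      norm_num
      have hne : n - (k:Int) ≠ n - (k:Int) - 1 := by omega
      rw [PySem.Dict.get?_insert_of_ne _ _ hne,
          hc0 (n - (k:Int)) (by omega)]
      norm_num
      set cnt₂ := ((cnt.insert (n - (k:Int) - 1) 2).insert (n - (k:Int)) 1) with hcnt₂
      have h1 : (cnt₂.get? (n - ((k:Int) + 1) + 1)).getD 0 = 1 := by
        rw [show n - ((k:Int) + 1) + 1 = n - (k:Int) by ring, hcnt₂,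
            PySem.Dict.get?_insert_self]; rfl
      have h0 : ∀ j, n - ((k:Int) + 1) + 1 < j → (cnt₂.get? j).getD 0 = 0 := by
        intro j hj
        rw [hcnt₂, PySem.Dict.get?_insert_of_ne _ _ (by omega),
            PySem.Dict.get?_insert_of_ne _ _ (by omega)]
        exact hc0 j (by omega)
      obtain ⟨ihl, ihd⟩ := ih n (fixed ++ [n - (k:Int) - 1, n - (k:Int)]) cnt₂
        (by omega) (by push_cast; omega) (by push_cast; exact h1) (by push_cast; exact h0)
      constructor
      · rw [ihl]
        simp only [segB, List.append_assoc, List.cons_append, List.nil_append]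
      · intro j
        rw [ihd j]
        push_cast
        split_ifs with hA hB hB
        · rfl
        · omega
        · rw [hcnt₂, PySem.Dict.get?_insert_of_ne _ _ (by omega),
              show j = n - (k:Int) - 1 by omega, PySem.Dict.get?_insert_self]
          rfl
        · rw [hcnt₂, PySem.Dict.get?_insert_of_ne _ _ (by omega),
              PySem.Dict.get?_insert_of_ne _ _ (by omega)]

lemma fillWhile_stop (cnt : PySem.Dict Int Int) (i : Int) (fixed : List Int)
    (h : (cnt.get? i).getD 0 = 2) : fillWhile cnt i fixed = (fixed, cnt) := by
  rw [fillWhile]; simp [h]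

lemma fillWhile_one (cnt : PySem.Dict Int Int) (i : Int) (fixed : List Int)
    (h : (cnt.get? i).getD 0 = 1) :
    fillWhile cnt i fixed = (fixed ++ [i], cnt.insert i 2) := by
  rw [fillWhile]
  simp only [h]
  rw [dif_pos (by omega)]
  rw [fillWhile_stop _ _ _ (by rw [PySem.Dict.get?_insert_self]; rfl)]
  norm_num

lemma fill_all_two (l : List Int) : ∀ (fixed : List Int) (cnt : PySem.Dict Int Int),
    (∀ i ∈ l, (cnt.get? i).getD 0 = 2) →
    l.foldl (fun s i => fillWhile s.2 i s.1) (fixed, cnt) = (fixed, cnt) := by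
  induction l with
  | nil => intro fixed cnt _; rfl
  | cons x t ih =>
    intro fixed cnt h
    simp only [List.foldl_cons]
    rw [fillWhile_stop _ _ _ (h x (by simp))]
    exact ih fixed cnt (fun i hi => h i (by simp [hi]))

lemma segB_length (k : Nat) (n : Int) (hk : 1 ≤ k) : (segB k n).length = 2 * k - 1 := by
  induction k with
  | zero => omega
  | succ k ih =>
    match k, ih with
    | 0, _ => simp [segB]
    | k + 1, ih => simp only [segB, List.length_cons]; rw [ih (by omega)]; omega

lemma segB_flat (k : Nat) : ∀ (n : Int), 1 ≤ k → (k : Int) ≤ n - 1 →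
    (n - k + 1) :: segB k n
      = (PySem.List.pyRange (n - k + 1) (n + 1) 1).flatMap (fun j => [j, j]) := by
  induction k with
  | zero => intro n h1; omega
  | succ k ih =>
    intro n _ hk
    push_cast at hk
    match k, ih with
    | 0, _ =>
      rw [show n - ((0:Nat)+1:Nat) + 1 = n by push_cast; ring]
      rw [PySem.List.pyRange_one_cons (by omega),
          PySem.List.pyRange_one_eq_nil (by omega)]
      simp [segB]
    | k + 1, ih =>
      have hrec := ih n (by omega) (by push_cast; omega)
      push_cast at hrec ⊢
      rw [PySem.List.pyRange_one_cons (by omega)]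
      rw [show n - ((k:Int) + 1 + 1) + 1 + 1 = n - ((k:Int) + 1) + 1 by ring]
      simp only [List.flatMap_cons]
      rw [← hrec]
      simp only [segB]
      push_cast
      ring_nf
      rfl

lemma cnt0_zero (n : Int) : ∀ j,
    (((PySem.List.pyRange 1 (n + 1) 1).foldl (fun d i => d.insert i 0)
      (PySem.Dict.empty : PySem.Dict Int Int)).get? j).getD 0 = 0 := by
  apply zero_dict_getD
  intro j; simp [PySem.Dict.get?_empty]

-- the B-side fold, in closed form
lemma alt_flat (n : Int) (h : ¬ n < 1) :
    motif_ladder_alt n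
      = ([1] ++ (PySem.List.pyRange 2 (n + 1) 1).flatMap (fun j => [j, j])) ++ [1] := by
  unfold motif_ladder_alt
  rw [if_neg h, PySem.List.foldl_append_eq_flatMap]

-- ===== VERDICT (by name: the statement is the Claim_ definition above) =====
theorem motif_ladder_spec : Claim_equal_motif_ladder := by
  intro n _
  unfold Spec_motif_ladder motif_ladder
  by_cases hn : n < 1
  · -- n ≤ 0: the while loop never runs, every range is empty, the slice of [] is []
    rw [motifLoop_stop n [] 1 2 (by simp only [List.length_nil, Nat.cast_zero]; omega),
        PySem.List.pyRange_one_eq_nil (by omega)]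
    simp only [List.foldl_nil]
    unfold motif_ladder_alt
    rw [if_pos hn]
    simp [PySem.List.slice]
  · by_cases h1 : n = 1
    · -- n = 1: out = [1,1]; dedup keeps both; the fill loop adds nothing
      subst h1
      rw [motifLoop_spec 1 1 [] 1 2 (by omega) (by norm_num) (by norm_num)
            (by intro _; norm_num)]
      have hseg : segA 1 1 = [1, 1] := by simp [segA]
      rw [hseg]
      have hr : PySem.List.pyRange 1 (1 + 1) 1 = [1] := by
        rw [PySem.List.pyRange_one_cons (by norm_num),
            PySem.List.pyRange_one_eq_nil (by norm_num)]
      rw [hr]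
      simp only [List.nil_append, List.foldl_cons, List.foldl_nil]
      rw [fillWhile_stop _ _ _ (by decide)]
      decide
    · -- n ≥ 2
      have hn2 : 2 ≤ n := by omega
      set m : Nat := n.toNat - 2 with hm
      have hnm : ((m:Int) + 2) = n := by omega
      -- phase 1: the loop produces segA (m+2) n = 1 :: 2 :: segA (m+1) n
      rw [motifLoop_spec (m + 2) n [] 1 2 (by omega) (by push_cast; omega)
            (by simp only [List.length_nil, Nat.cast_zero]; push_cast; omega)
            (by intro _; constructor; · push_cast; omega
                · left; push_cast; omega)]
      have hseg : segA (m + 2) n = (1:Int) :: 2 :: segA (m + 1) n := by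
        simp only [segA]
        push_cast
        rw [if_pos (by omega)]
        rw [show n - ((m:Int) + 1) = 1 by omega, show n - (m:Int) = 2 by omega]
        norm_num
      rw [hseg]
      have hz := cnt0_zero n
      -- phase 2: the first pair [1, 2] is taken, then dedup_spec covers the rest
      simp only [List.nil_append, List.foldl_cons, dedupStep, hz]
      norm_num
      rw [PySem.Dict.get?_insert_of_ne _ _ (by omega), hz 2]
      norm_num
      set cnt0 : PySem.Dict Int Int := (PySem.List.pyRange 1 (n + 1) 1).foldl
        (fun d i => d.insert i 0) PySem.Dict.empty with hcnt0
      set cnt₂ : PySem.Dict Int Int := ((cnt0.insert 1 1).insert 2 1) with hcnt₂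
      obtain ⟨ihl, ihd⟩ := dedup_spec (m + 1) n [(1:Int), 2] cnt₂ (by omega)
        (by push_cast; omega)
        (by rw [show n - ((m:Nat)+1:Nat) + 1 = 2 by push_cast; omega, hcnt₂,
                PySem.Dict.get?_insert_self]; rfl)
        (by intro j hj
            rw [hcnt₂, PySem.Dict.get?_insert_of_ne _ _ (by push_cast at hj; omega),
                PySem.Dict.get?_insert_of_ne _ _ (by push_cast at hj; omega)]
            exact hz j)
      -- phase 3: cnt[1] = 1 gets one extra 1 appended; every other key is at 2
      have hfix := ihl
      set P := (segA (m + 1) n).foldl dedupStep ([(1:Int), 2], cnt₂) with hP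
      have hd1 : ((P.2.get? 1).getD 0) = 1 := by
        rw [ihd 1, if_neg (by push_cast; omega), hcnt₂,
            PySem.Dict.get?_insert_of_ne _ _ (by omega),
            PySem.Dict.get?_insert_self]
        rfl
      have hrange : PySem.List.pyRange 1 (n + 1) 1 = 1 :: PySem.List.pyRange 2 (n + 1) 1 := by
        rw [PySem.List.pyRange_one_cons (by omega)]; norm_num
      have hPfold : (PySem.List.pyRange 1 (n + 1) 1).foldl
          (fun s i => fillWhile s.2 i s.1) P = (P.1 ++ [1], P.2.insert 1 2) := by
        rw [hrange]
        simp only [List.foldl_cons]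
        rw [fillWhile_one _ _ _ hd1]
        apply fill_all_two
        intro i hi
        rw [PySem.List.mem_pyRange_one] at hi
        rw [PySem.Dict.get?_insert_of_ne _ _ (by omega), ihd i,
            if_pos (by push_cast; omega)]
      have hcases : ∀ (s : List Int × PySem.Dict Int Int), s = P →
          (PySem.List.pyRange 1 (n + 1) 1).foldl (fun s i => fillWhile s.2 i s.1) s
            = (P.1 ++ [1], P.2.insert 1 2) := by
        intro s hs; rw [hs, hPfold]
      rw [hcases _ rfl]
      -- assemble and discharge the final slice
      have hlen : ((P.1 ++ [1]).length : Int) = 2 * n := by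
        rw [hfix]
        simp only [List.length_append, List.length_cons, List.length_nil]
        rw [segB_length (m + 1) n (by omega)]
        push_cast
        omega
      have hslice : PySem.List.slice (P.1 ++ [1]) none (some (2 * n)) = P.1 ++ [1] := by
        rw [show (2 * n) = (((P.1 ++ [1]).length : Nat) : Int) by omega,
            PySem.List.slice_to_natCast, List.take_length]
      rw [hslice, hfix, alt_flat n hn]
      have hflat := segB_flat (m + 1) n (by omega) (by push_cast; omega)
      rw [show n - ((m:Nat)+1:Nat) + 1 = 2 by push_cast; omega] at hflat
      rw [← hflat]
      simp [segB]
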